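-- pv_equiv track=rewrite | github.com/pyinat/pyinaturalist | scripts/parse_openapi_spec.py | process_enum_params
-- ===== SOURCE A (Python) =====
-- def process_enum_params(enum_params) -> tuple[dict, dict]:
--     """Condense enumerated params into two categories:
--     * Params with the same values across all endpoints
--     * Params with different values for some endpoints
--     """
--     constant_enum_params = {name: options for (path, name, options) in enum_params}
--
--     def has_multiple_enums(name, options):
--         return any(n == name and o != options for (p, n, o) in enum_params)
--
--     def get_all_enums(name):
--         """Get all enums with the given parameter name, along with their parent endpoint paths"""
--         return {p: o for (p, n, o) in enum_params if n == name}
--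
--     # Find any enumerated params with same name but different values per endpoint
--     variable_enum_params = {
--         name: get_all_enums(name)
--         for name, options in constant_enum_params.items()
--         if has_multiple_enums(name, options)
--     }
--
--     for name in variable_enum_params:
--         constant_enum_params.pop(name)
--
--     return constant_enum_params, variable_enum_params
-- ===== SOURCE B (Python) =====
-- def process_enum_params(enum_params) -> tuple[dict, dict]:
--     """Single pass: group by name, tracking first options, a varies flag, and the path map."""
--     info = {}  # name -> [first_options, varies, {path: options}]
--     for path, name, options in enum_params:
--         rec = info.get(name)
--         if rec is None:
--             info[name] = [options, False, {path: options}]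
--         else:
--             if options != rec[0]:
--                 rec[1] = True
--             rec[2][path] = options
--     constant = {name: rec[0] for name, rec in info.items() if not rec[1]}
--     variable = {name: rec[2] for name, rec in info.items() if rec[1]}
--     return constant, variable
-- ===== Notes on version B (the rewrite author's own statement) =====
-- stated objective: alternative
-- what changed: Replaces A's per-name rescans of the whole input (an any() scan and a full filtering pass for every parameter name) with a single pass that groups entries by name in a dict, tracking each name's first options, a varies flag and its path->options map.
import Mathlib
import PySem

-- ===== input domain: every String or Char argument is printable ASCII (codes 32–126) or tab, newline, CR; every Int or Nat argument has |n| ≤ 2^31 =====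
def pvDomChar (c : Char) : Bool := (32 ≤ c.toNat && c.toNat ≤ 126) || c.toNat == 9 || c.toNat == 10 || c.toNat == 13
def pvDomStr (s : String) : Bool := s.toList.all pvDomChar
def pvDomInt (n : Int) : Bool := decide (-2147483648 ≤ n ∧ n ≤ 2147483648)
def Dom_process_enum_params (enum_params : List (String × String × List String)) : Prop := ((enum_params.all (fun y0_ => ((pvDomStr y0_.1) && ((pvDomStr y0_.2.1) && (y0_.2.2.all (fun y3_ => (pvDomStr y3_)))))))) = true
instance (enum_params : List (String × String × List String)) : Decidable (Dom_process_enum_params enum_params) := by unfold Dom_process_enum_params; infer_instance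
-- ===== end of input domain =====

-- B replaces A's per-name rescans of the input (one `any` + one full filter pass per parameter name)
-- with a single pass that groups entries by name; same return value, different algorithm.

-- ===== PORT A =====
-- entries are (path, name, options)
-- constant_enum_params = {name: options for (path, name, options) in enum_params}
def pvAConst (enum_params : List (String × String × List String)) : PySem.Dict String (List String) :=
  enum_params.foldl (fun d t => d.insert t.2.1 t.2.2) PySem.Dict.empty

-- def has_multiple_enums(name, options): any(n == name and o != options for (p, n, o) in enum_params)
def pvAHasMultiple (enum_params : List (String × String × List String)) (name : String) (options : List String) : Bool :=
  enum_params.any (fun t => t.2.1 == name && !(t.2.2 == options))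

-- def get_all_enums(name): {p: o for (p, n, o) in enum_params if n == name}
def pvAGetAll (enum_params : List (String × String × List String)) (name : String) : PySem.Dict String (List String) :=
  enum_params.foldl (fun d t => if t.2.1 == name then d.insert t.1 t.2.2 else d) PySem.Dict.empty

def process_enum_params (enum_params : List (String × String × List String)) : (List (String × List String)) × (List (String × List (String × List String))) :=
  let constant := pvAConst enum_params
  -- variable_enum_params = {name: get_all_enums(name) for name, options in constant.items() if has_multiple_enums(name, options)}
  let varEnum := constant.items.foldl
    (fun d p => if pvAHasMultiple enum_params p.1 p.2 then d.insert p.1 (pvAGetAll enum_params p.1).items else d)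
    PySem.Dict.empty
  -- for name in variable_enum_params: constant_enum_params.pop(name)   (pop's effect: erase; the value is discarded)
  let constant2 := varEnum.keys.foldl (fun d n => d.erase n) constant
  (constant2.items, varEnum.items)

-- ===== PORT B =====
-- info : name -> (first_options, varies, {path: options}), built in one pass
def pvBVal (info : PySem.Dict String (List String × Bool × PySem.Dict String (List String)))
    (t : String × String × List String) : List String × Bool × PySem.Dict String (List String) :=
  match info.get? t.2.1 with
  | none => (t.2.2, false, (PySem.Dict.empty : PySem.Dict String (List String)).insert t.1 t.2.2)
  | some r => (r.1, r.2.1 || !(t.2.2 == r.1), r.2.2.insert t.1 t.2.2)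

def pvBInfo (enum_params : List (String × String × List String)) :
    PySem.Dict String (List String × Bool × PySem.Dict String (List String)) :=
  enum_params.foldl (fun info t => info.insert t.2.1 (pvBVal info t)) PySem.Dict.empty

def process_enum_params_alt (enum_params : List (String × String × List String)) : (List (String × List String)) × (List (String × List (String × List String))) :=
  let info := pvBInfo enum_params
  ((info.items.filter (fun p => !p.2.2.1)).map (fun p => (p.1, p.2.1)),
   (info.items.filter (fun p => p.2.2.1)).map (fun p => (p.1, p.2.2.2.items)))

-- ===== PRECONDITION & SPEC =====
def Spec_process_enum_params (enum_params : List (String × String × List String)) (out : (List (String × List String)) × (List (String × List (String × List String)))) : Prop := out = process_enum_params_alt enum_params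
instance (enum_params : List (String × String × List String)) (out : (List (String × List String)) × (List (String × List (String × List String)))) : Decidable (Spec_process_enum_params enum_params out) := by unfold Spec_process_enum_params; infer_instance

-- ===== CLAIM (what is proved, stated in full; the proofs are below) =====
def Claim_equal_process_enum_params : Prop := ∀ (enum_params : List (String × String × List String)), Dom_process_enum_params enum_params → Spec_process_enum_params enum_params (process_enum_params enum_params)

-- ===== LEMMAS AND PROOFS =====

-- first / last options recorded for a name
def pvFirstOpt? (L : List (String × String × List String)) (name : String) : Option (List String) :=
  (L.find? (fun t => t.2.1 == name)).map (·.2.2)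
def pvLastOpt? (L : List (String × String × List String)) (name : String) : Option (List String) :=
  (L.reverse.find? (fun t => t.2.1 == name)).map (·.2.2)

lemma pvAConst_get? (L : List (String × String × List String)) (name : String) :
    (pvAConst L).get? name = pvLastOpt? L name := by
  induction L using List.reverseRecOn with
  | nil => simp [pvAConst, pvLastOpt?, PySem.Dict.get?_empty]
  | append_singleton L t ih =>
    simp only [pvAConst, List.foldl_append, List.foldl_cons, List.foldl_nil] at *
    rw [PySem.Dict.get?_insert]
    by_cases h : name = t.2.1
    · simp [pvLastOpt?, h]
    · simp [pvLastOpt?, h, Ne.symm h] at *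
      simpa [pvLastOpt?] using ih


lemma pvErase_fold_items {ν : Type} (K : List String) (d : PySem.Dict String ν) :
    (K.foldl (fun d n => d.erase n) d).items = d.items.filter (fun p => !(K.contains p.1)) := by
  induction K generalizing d with
  | nil => simp
  | cons n K ih =>
    rw [List.foldl_cons, ih]
    show (d.items.filter fun p => !(p.1 == n)).filter _ = _
    rw [List.filter_filter]
    apply List.filter_congr
    intro p _
    by_cases h : p.1 = n <;> simp [h, Bool.and_comm]

lemma pvAGetAll_of_no_match (L : List (String × String × List String)) (name : String)
    (h : L.find? (fun t => t.2.1 == name) = none) : pvAGetAll L name = PySem.Dict.empty := by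
  rw [List.find?_eq_none] at h
  unfold pvAGetAll
  induction L with
  | nil => rfl
  | cons t L ih =>
    rw [List.foldl_cons, if_neg (by simpa using h t (by simp))]
    exact ih (fun x hx => h x (by simp [hx]))

lemma pvAHasMultiple_of_no_match (L : List (String × String × List String)) (name : String)
    (f : List String) (h : L.find? (fun t => t.2.1 == name) = none) :
    pvAHasMultiple L name f = false := by
  rw [List.find?_eq_none] at h
  simp only [pvAHasMultiple, List.any_eq_false]
  intro t ht
  simp [show ¬ t.2.1 = name from by simpa using h t ht]

lemma pvAHasMultiple_false_iff (L : List (String × String × List String)) (name : String)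
    (x : List String) :
    pvAHasMultiple L name x = false ↔ ∀ t ∈ L, t.2.1 = name → t.2.2 = x := by
  simp [pvAHasMultiple, List.any_eq_false]

lemma pvFirstOpt?_mem (L : List (String × String × List String)) (name : String)
    (f : List String) (h : pvFirstOpt? L name = some f) :
    ∃ t ∈ L, t.2.1 = name ∧ t.2.2 = f := by
  unfold pvFirstOpt? at h
  cases hf : L.find? (fun t => t.2.1 == name) with
  | none => simp [hf] at h
  | some t =>
    rw [hf] at h
    refine ⟨t, List.mem_of_find?_eq_some hf, by simpa using List.find?_some hf, by simpa using h⟩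

lemma pvLastOpt?_mem (L : List (String × String × List String)) (name : String)
    (f : List String) (h : pvLastOpt? L name = some f) :
    ∃ t ∈ L, t.2.1 = name ∧ t.2.2 = f := by
  unfold pvLastOpt? at h
  cases hf : L.reverse.find? (fun t => t.2.1 == name) with
  | none => simp [hf] at h
  | some t =>
    rw [hf] at h
    exact ⟨t, by simpa using List.mem_of_find?_eq_some hf, by simpa using List.find?_some hf,
      by simpa using h⟩

lemma pvFirst_eq_last (L : List (String × String × List String)) (name : String)
    (f l : List String) (hf : pvFirstOpt? L name = some f) (_hl : pvLastOpt? L name = some l)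
    (h : pvAHasMultiple L name l = false) : l = f := by
  obtain ⟨t, ht, hn, ho⟩ := pvFirstOpt?_mem L name f hf
  rw [pvAHasMultiple_false_iff] at h
  rw [← ho]; exact (h t ht hn).symm

lemma pvHasMultiple_first_last (L : List (String × String × List String)) (name : String)
    (f l : List String) (hf : pvFirstOpt? L name = some f) (hl : pvLastOpt? L name = some l) :
    pvAHasMultiple L name f = pvAHasMultiple L name l := by
  obtain ⟨tf, htf, hnf, hof⟩ := pvFirstOpt?_mem L name f hf
  obtain ⟨tl, htl, hnl, hol⟩ := pvLastOpt?_mem L name l hl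
  have key : ∀ x y : List String, (∃ t ∈ L, t.2.1 = name ∧ t.2.2 = y) →
      pvAHasMultiple L name x = false → pvAHasMultiple L name y = false := by
    rintro x y ⟨t, ht, hn, ho⟩ hx
    rw [pvAHasMultiple_false_iff] at hx ⊢
    intro u hu hun
    rw [hx u hu hun, ← ho, hx t ht hn]
  by_cases h : pvAHasMultiple L name f = false
  · rw [h, key f l ⟨tl, htl, hnl, hol⟩ h]
  · have h2 : ¬ pvAHasMultiple L name l = false := fun hl2 => h (key l f ⟨tf, htf, hnf, hof⟩ hl2)
    simp only [Bool.not_eq_false] at h h2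
    rw [h, h2]

lemma pvFirstOpt?_isSome_of_mem (L : List (String × String × List String)) (name : String)
    (h : name ∈ L.map (fun t => t.2.1)) : (pvFirstOpt? L name).isSome := by
  obtain ⟨t, ht, rfl⟩ := List.mem_map.mp h
  simp only [pvFirstOpt?, Option.isSome_map]
  rw [List.find?_isSome]
  exact ⟨t, ht, by simp⟩

lemma pvLastOpt?_isSome_of_mem (L : List (String × String × List String)) (name : String)
    (h : name ∈ L.map (fun t => t.2.1)) : (pvLastOpt? L name).isSome := by
  obtain ⟨t, ht, rfl⟩ := List.mem_map.mp h
  simp only [pvLastOpt?, Option.isSome_map]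
  rw [List.find?_isSome]
  exact ⟨t, by simpa using ht, by simp⟩

lemma pvBVal_none (info : PySem.Dict String (List String × Bool × PySem.Dict String (List String)))
    (t : String × String × List String) (h : info.get? t.2.1 = none) :
    pvBVal info t = (t.2.2, false, (PySem.Dict.empty : PySem.Dict String (List String)).insert t.1 t.2.2) := by
  unfold pvBVal; rw [h]

lemma pvBVal_some (info : PySem.Dict String (List String × Bool × PySem.Dict String (List String)))
    (t : String × String × List String) (r) (h : info.get? t.2.1 = some r) :
    pvBVal info t = (r.1, r.2.1 || !(t.2.2 == r.1), r.2.2.insert t.1 t.2.2) := by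
  unfold pvBVal; rw [h]

lemma pvBInfo_get? (L : List (String × String × List String)) (name : String) :
    (pvBInfo L).get? name =
      (pvFirstOpt? L name).map (fun f => (f, pvAHasMultiple L name f, pvAGetAll L name)) := by
  induction L using List.reverseRecOn with
  | nil => simp [pvBInfo, pvFirstOpt?, PySem.Dict.get?_empty]
  | append_singleton L t ih =>
    simp only [pvBInfo, List.foldl_append, List.foldl_cons, List.foldl_nil] at *
    rw [PySem.Dict.get?_insert]
    by_cases h : name = t.2.1
    · subst h
      rw [if_pos rfl]
      cases hf : pvFirstOpt? L t.2.1 with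
      | none =>
        have hfn : L.find? (fun u => u.2.1 == t.2.1) = none := by
          unfold pvFirstOpt? at hf
          cases h2 : L.find? (fun u => u.2.1 == t.2.1) <;> simp [h2] at hf ⊢
        rw [pvBVal_none _ t (by rw [ih, hf]; rfl)]
        have h1 : pvFirstOpt? (L ++ [t]) t.2.1 = some t.2.2 := by
          simp [pvFirstOpt?, List.find?_append, hfn]
        have h0 := pvAHasMultiple_of_no_match L t.2.1 t.2.2 hfn
        have h2 : pvAHasMultiple (L ++ [t]) t.2.1 t.2.2 = false := by
          simp only [pvAHasMultiple] at h0 ⊢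
          simp [List.any_append, h0]
        have h3 : pvAGetAll (L ++ [t]) t.2.1 = PySem.Dict.empty.insert t.1 t.2.2 := by
          rw [show pvAGetAll (L ++ [t]) t.2.1 = (pvAGetAll L t.2.1).insert t.1 t.2.2 from by
            simp [pvAGetAll, List.foldl_append], pvAGetAll_of_no_match L t.2.1 hfn]
        rw [h1, Option.map_some, h2, h3]
      | some f =>
        rw [pvBVal_some _ t (f, pvAHasMultiple L t.2.1 f, pvAGetAll L t.2.1) (by rw [ih, hf]; rfl)]
        have h1 : pvFirstOpt? (L ++ [t]) t.2.1 = some f := by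
          unfold pvFirstOpt? at hf ⊢
          rw [List.find?_append]
          cases h2 : L.find? (fun u => u.2.1 == t.2.1) <;> simp [h2] at hf ⊢
          simp [hf]
        rw [h1]
        simp only [Option.map_some]
        have h2 : pvAHasMultiple (L ++ [t]) t.2.1 f = (pvAHasMultiple L t.2.1 f || !(t.2.2 == f)) := by
          simp [pvAHasMultiple, List.any_append]
        have h3 : pvAGetAll (L ++ [t]) t.2.1 = (pvAGetAll L t.2.1).insert t.1 t.2.2 := by
          simp [pvAGetAll, List.foldl_append]
        rw [h2, h3]
    · rw [if_neg h]
      rw [ih]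
      have hne : (t.2.1 == name) = false := by simpa using fun hh => h (by rw [hh])
      have h1 : pvFirstOpt? (L ++ [t]) name = pvFirstOpt? L name := by
        simp [pvFirstOpt?, List.find?_append, hne]
      have h2 : ∀ f, pvAHasMultiple (L ++ [t]) name f = pvAHasMultiple L name f := by
        intro f; simp [pvAHasMultiple, List.any_append, hne]
      have h3 : pvAGetAll (L ++ [t]) name = pvAGetAll L name := by
        simp [pvAGetAll, List.foldl_append, Ne.symm h]
      rw [h1]
      cases pvFirstOpt? L name <;> simp [h2, h3]

theorem pv_main (L : List (String × String × List String)) :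
    process_enum_params L = process_enum_params_alt L := by
  -- canonical data per name
  set K : List String := PySem.Set.ofList (L.map (fun t => t.2.1)) with hK
  set pvF : String → List String := fun k => (pvFirstOpt? L k).getD [] with hpvF
  set pvL : String → List String := fun k => (pvLastOpt? L k).getD [] with hpvL
  set pvVar : String → Bool := fun k => pvAHasMultiple L k (pvF k) with hpvVar
  have hmemK : ∀ k ∈ K, k ∈ L.map (fun t => t.2.1) := by
    intro k hk; exact (PySem.Set.mem_ofList _ k).mp hk
  have hFsome : ∀ k ∈ K, pvFirstOpt? L k = some (pvF k) := by
    intro k hk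
    have := pvFirstOpt?_isSome_of_mem L k (hmemK k hk)
    cases h : pvFirstOpt? L k with
    | none => rw [h] at this; simp at this
    | some f => simp [hpvF, h]
  have hLsome : ∀ k ∈ K, pvLastOpt? L k = some (pvL k) := by
    intro k hk
    have := pvLastOpt?_isSome_of_mem L k (hmemK k hk)
    cases h : pvLastOpt? L k with
    | none => rw [h] at this; simp at this
    | some f => simp [hpvL, h]
  -- A-side constant dict
  have hKc : (pvAConst L).keys = K := by
    rw [pvAConst, PySem.Dict.keys_foldl_insert_key L (fun t => t.2.1) (fun _ t => t.2.2)]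
    rfl
  have hndc : (pvAConst L).keys.Nodup := by
    rw [hKc]; exact PySem.Set.nodup_ofList _
  have hcitems : (pvAConst L).items = K.map (fun k => (k, pvL k)) := by
    rw [PySem.Dict.items_eq_map_keys (pvAConst L) hndc [], hKc]
    apply List.map_congr_left
    intro k hk
    rw [PySem.Dict.getD_eq_get?_getD, pvAConst_get?, hLsome k hk]
    rfl
  -- B-side info dict
  have hKi : (pvBInfo L).keys = K := by
    rw [pvBInfo, PySem.Dict.keys_foldl_insert_key L (fun t => t.2.1) pvBVal]
    rfl
  have hndi : (pvBInfo L).keys.Nodup := by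
    rw [hKi]; exact PySem.Set.nodup_ofList _
  have hgetD : ∀ k ∈ K, (pvBInfo L).getD k ([], false, PySem.Dict.empty) =
      (pvF k, pvVar k, pvAGetAll L k) := by
    intro k hk
    rw [PySem.Dict.getD_eq_get?_getD, pvBInfo_get?, hFsome k hk]
    rfl
  have hiitems : (pvBInfo L).items = K.map (fun k => (k, pvF k, pvVar k, pvAGetAll L k)) := by
    rw [PySem.Dict.items_eq_map_keys (pvBInfo L) hndi ([], false, PySem.Dict.empty), hKi]
    exact List.map_congr_left (fun k hk => by rw [hgetD k hk])
  -- A-side variable dict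
  have hvarcong : ∀ k ∈ K, pvAHasMultiple L k (pvL k) = pvVar k := by
    intro k hk
    exact (pvHasMultiple_first_last L k (pvF k) (pvL k) (hFsome k hk) (hLsome k hk)).symm
  -- A-side variable dict as a fold over the filtered items
  set v := ((pvAConst L).items.foldl
      (fun d p => if pvAHasMultiple L p.1 p.2 then d.insert p.1 (pvAGetAll L p.1).items else d)
      PySem.Dict.empty) with hv
  have hvfold : v = ((pvAConst L).items.filter (fun p => pvAHasMultiple L p.1 p.2)).foldl
      (fun d p => d.insert p.1 (pvAGetAll L p.1).items) PySem.Dict.empty := by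
    rw [hv, List.foldl_filter]
  have hnodupf : (((pvAConst L).items.filter (fun p => pvAHasMultiple L p.1 p.2)).map
      (fun p => p.1)).Nodup := by
    have hsub : ((pvAConst L).items.filter (fun p => pvAHasMultiple L p.1 p.2)).Sublist
        (pvAConst L).items := List.filter_sublist
    exact List.Nodup.sublist (hsub.map (fun p => p.1)) hndc
  have hvitems : v.items = (K.filter pvVar).map (fun k => (k, (pvAGetAll L k).items)) := by
    rw [hvfold, PySem.Dict.items_foldl_insert_fresh
      ((pvAConst L).items.filter (fun p => pvAHasMultiple L p.1 p.2)) (fun p => p.1)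
      (fun p => (pvAGetAll L p.1).items) PySem.Dict.empty
      (fun a _ => PySem.Dict.contains_empty _) hnodupf]
    rw [hcitems, List.filter_map, List.map_map]
    show [] ++ _ = _
    rw [List.nil_append]
    rw [List.filter_congr (q := fun k => pvVar k) (by
      intro k hk
      simp only [Function.comp_apply]
      exact hvarcong k hk)]
    exact List.map_congr_left (fun k _ => rfl)
  have hvkeys : v.keys = K.filter pvVar := by
    show v.items.map Prod.fst = _
    rw [hvitems, List.map_map]
    exact List.map_congr_left (fun k _ => rfl) |>.trans (List.map_id _)
  have hcontains : ∀ k ∈ K, (K.filter pvVar).contains k = pvVar k := by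
    intro k hk
    by_cases hb : pvVar k = true
    · simp [List.mem_filter, hk, hb]
    · rw [Bool.not_eq_true] at hb
      rw [hb]
      simp [List.mem_filter, hb]
  have hc2 : (v.keys.foldl (fun d n => d.erase n) (pvAConst L)).items =
      (K.filter (fun k => !pvVar k)).map (fun k => (k, pvF k)) := by
    rw [pvErase_fold_items, hcitems, List.filter_map, hvkeys]
    rw [List.filter_congr (q := fun k => !pvVar k) (by
      intro k hk
      simp only [Function.comp_apply]
      rw [hcontains k hk])]
    apply List.map_congr_left
    intro k hk
    have hkK : k ∈ K := (List.mem_filter.mp hk).1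
    have hnv : pvVar k = false := by
      have := (List.mem_filter.mp hk).2
      simpa using this
    have hml : pvAHasMultiple L k (pvL k) = false := by
      rw [hvarcong k hkK, hnv]
    have : pvL k = pvF k :=
      pvFirst_eq_last L k (pvF k) (pvL k) (hFsome k hkK) (hLsome k hkK) hml
    rw [this]
  -- B side canonical
  have hBconst : ((pvBInfo L).items.filter (fun p => !p.2.2.1)).map (fun p => (p.1, p.2.1)) =
      (K.filter (fun k => !pvVar k)).map (fun k => (k, pvF k)) := by
    rw [hiitems, List.filter_map, List.map_map]
    rfl
  have hBvar : ((pvBInfo L).items.filter (fun p => p.2.2.1)).map (fun p => (p.1, p.2.2.2.items)) =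
      (K.filter pvVar).map (fun k => (k, (pvAGetAll L k).items)) := by
    rw [hiitems, List.filter_map, List.map_map]
    rfl
  have e1 : process_enum_params L =
      ((v.keys.foldl (fun d n => d.erase n) (pvAConst L)).items, v.items) := rfl
  have e2 : process_enum_params_alt L =
      (((pvBInfo L).items.filter (fun p => !p.2.2.1)).map (fun p => (p.1, p.2.1)),
       ((pvBInfo L).items.filter (fun p => p.2.2.1)).map (fun p => (p.1, p.2.2.2.items))) := rfl
  rw [e1, e2, hc2, hvitems, hBconst, hBvar]

-- ===== VERDICT (by name: the statement is the Claim_ definition above) =====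
theorem process_enum_params_spec : Claim_equal_process_enum_params := by
  intro L _
  unfold Spec_process_enum_params
  exact pv_main L
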